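-- pv_equiv track=rewrite | github.com/RRG314/RDT-toolbox | src/rdt_showcase/rdt_index.py | path_signature
-- ===== SOURCE A (Python) =====
-- from typing import Any, Dict, Iterable, List, Optional, Sequence, Tuple
--
-- def path_signature(key: int) -> List[int]:
--     n = int(key)
--     if n <= 0:
--         return [0]
--     out = [n]
--     while n > 1:
--         n = n >> 1
--         out.append(n)
--     return out
-- ===== SOURCE B (Python) =====
-- def path_signature(key: int) -> list:
--     n = int(key)
--     if n <= 0:
--         return [0]
--     # Accumulate the binary prefixes of n, MSB first: each prefix of the bit
--     # string is one element of the path; the path is these prefixes reversed.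
--     out = []
--     acc = 0
--     for c in bin(n)[2:]:
--         acc = 2 * acc + (1 if c == '1' else 0)
--         out.append(acc)
--     out.reverse()
--     return out
-- ===== Notes on version B (the rewrite author's own statement) =====
-- stated objective: alternative
-- what changed: Instead of repeatedly halving n while n>1, B walks the binary digit string of n MSB-first, accumulating each binary prefix (acc = 2*acc + bit) into a list, and returns that prefix list reversed; no shifting or halving of running state occurs.
import Mathlib
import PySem

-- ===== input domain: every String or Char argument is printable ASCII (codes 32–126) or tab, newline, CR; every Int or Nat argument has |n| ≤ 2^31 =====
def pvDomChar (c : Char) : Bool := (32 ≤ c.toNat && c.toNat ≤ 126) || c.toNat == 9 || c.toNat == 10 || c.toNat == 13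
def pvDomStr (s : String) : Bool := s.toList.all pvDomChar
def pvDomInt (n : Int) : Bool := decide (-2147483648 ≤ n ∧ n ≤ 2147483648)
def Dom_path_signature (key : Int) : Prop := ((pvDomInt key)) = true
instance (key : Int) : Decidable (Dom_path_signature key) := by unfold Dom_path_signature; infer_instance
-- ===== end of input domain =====

-- B replaces A's halving while-loop by accumulating the binary prefixes of n (MSB first) and reversing them (alternative decomposition; same values everywhere).

-- ===== PORT A =====
-- the `while n > 1: n = n >> 1; out.append(n)` loop of A
def pathLoopA (n : Int) : List Int :=
  if _h : n > 1 then (n >>> (1 : Nat)) :: pathLoopA (n >>> (1 : Nat)) else []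
termination_by n.toNat
decreasing_by
  simp only [Int.shiftRight_eq_div_pow, pow_one]
  omega

def path_signature (key : Int) : List Int :=
  if key ≤ 0 then [0] else key :: pathLoopA key

-- ===== PORT B =====
-- `bin(n)[2:]` is ported by hand as the MSB-first binary digit list of n.toNat (exact for the positive n it is applied to)
def binDigits (m : Nat) : List Nat :=
  if m ≤ 1 then [m] else binDigits (m / 2) ++ [m % 2]
termination_by m
decreasing_by omega

-- one step of B's loop: acc = 2*acc + bit; out.append(acc)
def goB (st : Int × List Int) (b : Nat) : Int × List Int :=
  let acc := 2 * st.1 + (if b = 1 then 1 else 0)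
  (acc, st.2 ++ [acc])

def path_signature_alt (key : Int) : List Int :=
  if key ≤ 0 then [0]
  else (((binDigits key.toNat).foldl goB ((0 : Int), ([] : List Int))).2).reverse

-- ===== PRECONDITION & SPEC =====
def Spec_path_signature (key : Int) (out : List Int) : Prop := out = path_signature_alt key
instance (key : Int) (out : List Int) : Decidable (Spec_path_signature key out) := by unfold Spec_path_signature; infer_instance

-- ===== CLAIM (what is proved, stated in full; the proofs are below) =====
def Claim_equal_path_signature : Prop := ∀ (key : Int), Dom_path_signature key → Spec_path_signature key (path_signature key)

-- ===== LEMMAS AND PROOFS =====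

theorem foldl_binDigits_eq (m : Nat) (h : 1 ≤ m) :
    (binDigits m).foldl goB ((0 : Int), ([] : List Int)) =
      ((m : Int), (((m : Int) :: pathLoopA (m : Int)).reverse)) := by
  induction m using binDigits.induct with
  | case1 m h1 =>
    have : m = 1 := by omega
    subst this
    rw [binDigits]
    rw [pathLoopA]
    norm_num [goB]
  | case2 m h1 ih =>
    have hm2 : 1 ≤ m / 2 := by omega
    have hshift : (m : Int) >>> (1 : Nat) = ((m / 2 : Nat) : Int) := by
      simp only [Int.shiftRight_eq_div_pow, pow_one]
      omega
    have hexp : pathLoopA (m : Int) = ((m / 2 : Nat) : Int) :: pathLoopA ((m / 2 : Nat) : Int) := by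
      rw [pathLoopA, dif_pos (by exact_mod_cast (by omega : (1 : Int) < (m : Int)))]
      rw [hshift]
    have hacc : 2 * ((m / 2 : Nat) : Int) + (if m % 2 = 1 then (1:Int) else 0) = (m : Int) := by
      split_ifs with hp <;> push_cast <;> omega
    rw [binDigits, if_neg h1, List.foldl_append, ih hm2, hexp]
    simp only [List.foldl, goB, List.reverse_cons]
    rw [hacc]

-- ===== VERDICT (by name: the statement is the Claim_ definition above) =====
theorem path_signature_spec : Claim_equal_path_signature := by
  intro key _
  unfold Spec_path_signature path_signature path_signature_alt
  split_ifs with h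
  · rfl
  · have h1 : 1 ≤ key.toNat := by omega
    have hk : ((key.toNat : Int)) = key := by omega
    rw [foldl_binDigits_eq key.toNat h1]
    simp [hk]
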